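-- pv_equiv track=rewrite | github.com/Grant-Syt/Python_Practice | fraudulent_activity_notifications/fraudulent_activity_notifications.py | activityNotifications2
-- ===== SOURCE A (Python) =====
-- def get_limit(f,d):
--     count = 0
--     m1,m2 = (d//2,d//2+1)
--     m = []
--     for i,j in enumerate(f):
--         count+=j
--         if not m and m1<=count:
--             m.append(i)
--         if m2<=count:
--             m.append(i)
--             break
--     return m[-1]*2 if d%2 else sum(m)
--
-- def activityNotifications2(e, n, d):
--     f = [0]*201
--     count = 0
--     for i in e[:d]:
--         f[i]+=1
--     for i,v in enumerate(e[d:]):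
--         limit = get_limit(f,d)
--         if v>=limit:
--             count+=1
--         f[v]+=1
--         f[e[i]]-=1
--
--     return count
-- ===== SOURCE B (Python) =====
-- def activityNotifications2(e, n, d):
--     count = 0
--     for i in range(d, len(e)):
--         w = sorted(e[i - d:i])
--         if d % 2:
--             t = 2 * w[d // 2]
--         else:
--             t = w[d // 2 - 1] + w[d // 2]
--         if e[i] >= t:
--             count += 1
--     return count
-- ===== Notes on version B (the rewrite author's own statement) =====
-- stated objective: alternative
-- what changed: Replaces the maintained 201-bucket frequency table and its cumulative counting scan for the doubled median by re-slicing and sorting each trailing window and indexing its middle elements directly.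
-- outside the precondition, e.g. on activityNotifications2([1, 2], 2, 0): A returns 2, B raises IndexError; on activityNotifications2([-1, 3, -1, 3], 4, 2): A returns 0, B returns 1
import Mathlib
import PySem

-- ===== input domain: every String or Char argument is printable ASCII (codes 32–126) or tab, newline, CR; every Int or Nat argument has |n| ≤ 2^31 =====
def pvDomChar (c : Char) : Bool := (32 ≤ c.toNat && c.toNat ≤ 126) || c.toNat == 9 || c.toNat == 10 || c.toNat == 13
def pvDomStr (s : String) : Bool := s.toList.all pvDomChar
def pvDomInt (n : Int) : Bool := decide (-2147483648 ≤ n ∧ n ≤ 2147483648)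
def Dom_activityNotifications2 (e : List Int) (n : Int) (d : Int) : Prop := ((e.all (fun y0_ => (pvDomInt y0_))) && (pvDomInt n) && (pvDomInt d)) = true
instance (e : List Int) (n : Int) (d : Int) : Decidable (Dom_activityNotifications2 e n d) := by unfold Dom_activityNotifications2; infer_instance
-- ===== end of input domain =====

-- B replaces A's maintained 201-bucket frequency table (and its cumulative counting scan for the
-- doubled median) by sorting each trailing window and indexing its middle elements directly; it is
-- an alternative algorithm of similar cost, not claimed faster.


-- ===== PORT A =====

-- f[i] += delta : Python list element update; negative i indexes from the end, out-of-range is an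
-- IndexError (PySem's pySetD/pyGetD total forms; out-of-range unreachable under Pre_).
def pyBump (f : List Int) (i δ : Int) : List Int :=
  PySem.List.pySetD f i (PySem.List.pyGetD f i 0 + δ)

-- the 'for i,j in enumerate(f)' loop of get_limit, with its early break
def getLimitLoop (m1 m2 : Int) : List Int → Int → Int → List Int → List Int
  | [], _, _, m => m
  | j :: rest, i, count, m =>
    let count := count + j
    let m := if m = [] ∧ m1 ≤ count then m ++ [i] else m
    if m2 ≤ count then m ++ [i]
    else getLimitLoop m1 m2 rest (i + 1) count m

def getLimit (f : List Int) (d : Int) : Int :=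
  let m1 := PySem.Int.floordiv d 2
  let m2 := m1 + 1
  let m := getLimitLoop m1 m2 f 0 0 []
  -- m[-1] raises IndexError on empty m (unreachable under Pre_); total form defaults to 0
  if PySem.Int.mod d 2 ≠ 0 then PySem.List.pyGetD m (-1) 0 * 2 else m.sum

def activityNotifications2 (e : List Int) (n : Int) (d : Int) : Int :=
  let f := (PySem.List.slice e none (some d)).foldl (fun f i => pyBump f i 1) (List.replicate 201 0)
  let st := (PySem.List.enumerate (PySem.List.slice e (some d) none) 0).foldl
    (fun (st : List Int × Int) iv =>
      let limit := getLimit st.1 d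
      let count := if iv.2 ≥ limit then st.2 + 1 else st.2
      let f := pyBump st.1 iv.2 1
      let f := pyBump f (PySem.List.pyGetD e iv.1 0) (-1)   -- e[i]; in range whenever reached
      (f, count)) (f, 0)
  st.2

-- ===== PORT B =====

def activityNotifications2_alt (e : List Int) (n : Int) (d : Int) : Int :=
  (PySem.List.pyRange d e.length 1).foldl (fun count i =>
    let w := PySem.List.sorted (PySem.List.slice e (some (i - d)) (some i)) (fun x => x) false
    let h := PySem.Int.floordiv d 2
    -- w[d//2] / w[d//2-1] : in range whenever the loop body runs (i ≥ d ≥ 1); total form defaults to 0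
    let t := if PySem.Int.mod d 2 ≠ 0 then 2 * PySem.List.pyGetD w h 0
             else PySem.List.pyGetD w (h - 1) 0 + PySem.List.pyGetD w h 0
    if PySem.List.pyGetD e i 0 ≥ t then count + 1 else count) 0

-- ===== PRECONDITION & SPEC =====

-- Pre_ is the function's natural input contract: d ≥ 1, no value outside [-201, 200] (beyond which
-- A raises IndexError on its 201-bucket table), and, whenever a full window exists (d ≤ len e),
-- expenditures in 0..200 (the 201 buckets). Excluded while A still returns: d ≤ 0, where A's value
-- comes from leftover empty/negative-window state (there B raises IndexError), and negative values
-- in a reachable window, where A's value comes from Python's negative-index wraparound into the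
-- bucket table.
def Pre_activityNotifications2 (e : List Int) (n : Int) (d : Int) : Prop :=
  1 ≤ d ∧ (∀ x ∈ e, -201 ≤ x ∧ x ≤ 200) ∧ (d ≤ (e.length : Int) → ∀ x ∈ e, 0 ≤ x ∧ x ≤ 200)
instance (e : List Int) (n : Int) (d : Int) : Decidable (Pre_activityNotifications2 e n d) := by
  unfold Pre_activityNotifications2; infer_instance

def pvWitness_activityNotifications2 : List Int × Int × Int := ([2, 3, 4, 2, 3, 6, 8, 4, 5], 9, 5)

def Spec_activityNotifications2 (e : List Int) (n : Int) (d : Int) (out : Int) : Prop := out = activityNotifications2_alt e n d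
instance (e : List Int) (n : Int) (d : Int) (out : Int) : Decidable (Spec_activityNotifications2 e n d out) := by unfold Spec_activityNotifications2; infer_instance

-- ===== CLAIM (what is proved, stated in full; the proofs are below) =====
def Claim_equal_activityNotifications2 : Prop := ∀ (e : List Int) (n : Int) (d : Int), Dom_activityNotifications2 e n d → Pre_activityNotifications2 e n d → Spec_activityNotifications2 e n d (activityNotifications2 e n d)


-- ===== LEMMAS AND PROOFS =====

-- bucket table of a window: bucket x holds the number of occurrences of x
def freqL (w : List Int) : List Int := List.map (fun x : Nat => (w.count (x : Int) : Int)) (List.range 201)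

-- the index (counted from i = 0) at which get_limit's running count first reaches k
def firstGE (k : Int) : List Int → Int → Int
  | [], _ => 0
  | j :: rest, c => if k ≤ c + j then 0 else 1 + firstGE k rest (c + j)

-- the loop bodies of the two ports, as named functions
def stepA (e : List Int) (d : Int) (st : List Int × Int) (iv : Int × Int) : List Int × Int :=
  (pyBump (pyBump st.1 iv.2 1) (PySem.List.pyGetD e iv.1 0) (-1),
   if iv.2 ≥ getLimit st.1 d then st.2 + 1 else st.2)

def stepB (e : List Int) (d : Int) (count : Int) (i : Int) : Int :=
  if PySem.List.pyGetD e i 0 ≥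
      (if PySem.Int.mod d 2 ≠ 0 then
        2 * PySem.List.pyGetD (PySem.List.sorted (PySem.List.slice e (some (i - d)) (some i)) (fun x => x) false) (PySem.Int.floordiv d 2) 0
       else
        PySem.List.pyGetD (PySem.List.sorted (PySem.List.slice e (some (i - d)) (some i)) (fun x => x) false) (PySem.Int.floordiv d 2 - 1) 0 +
        PySem.List.pyGetD (PySem.List.sorted (PySem.List.slice e (some (i - d)) (some i)) (fun x => x) false) (PySem.Int.floordiv d 2) 0)
  then count + 1 else count

theorem portA_eq (e : List Int) (n d : Int) :
    activityNotifications2 e n d =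
      ((PySem.List.enumerate (PySem.List.slice e (some d) none) 0).foldl (stepA e d)
        ((PySem.List.slice e none (some d)).foldl (fun f i => pyBump f i 1) (List.replicate 201 0), 0)).2 := rfl

theorem portB_eq (e : List Int) (n d : Int) :
    activityNotifications2_alt e n d = (PySem.List.pyRange d e.length 1).foldl (stepB e d) 0 := rfl

theorem freqL_length (w : List Int) : (freqL w).length = 201 := by
  simp only [freqL, List.length_map, List.length_range]

theorem freqL_getElem (w : List Int) (t : Nat) (ht : t < 201) :
    (freqL w)[t]'(by rw [freqL_length]; exact ht) = (w.count (t : Int) : Int) := by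
  simp only [freqL, List.getElem_map, List.getElem_range]

theorem pyBump_freqL_count (u w : List Int) (v : Int) (h0 : 0 ≤ v) (h1 : v ≤ 200) (δ : Int)
    (hcnt : ∀ x : Int, 0 ≤ x → x ≤ 200 → (w.count x : Int) = (u.count x : Int) + if x = v then δ else 0) :
    pyBump (freqL u) v δ = freqL w := by
  unfold pyBump
  rw [PySem.List.pySetD_of_nonneg _ _ h0,
      PySem.List.pyGetD_eq_getElem _ _ h0 (by rw [freqL_length]; omega)]
  apply List.ext_getElem (by rw [List.length_set, freqL_length, freqL_length])
  intro t h1t h2t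
  rw [List.getElem_set]
  have ht : t < 201 := by rw [List.length_set, freqL_length] at h1t; exact h1t
  have hv : v.toNat < 201 := by omega
  by_cases h : v.toNat = t
  · subst h
    simp only [if_pos rfl]
    rw [freqL_getElem u v.toNat hv, freqL_getElem w v.toNat hv,
        hcnt ((v.toNat : Nat) : Int) (by omega) (by omega)]
    simp [show ((v.toNat : Nat) : Int) = v by omega]
  · simp only [if_neg h]
    have e1 := freqL_getElem u t ht
    have e2 := freqL_getElem w t ht
    simp only [e1, e2, hcnt ((t : Nat) : Int) (by omega) (by omega)]
    have : ((t : Nat) : Int) ≠ v := by omega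
    simp [this]

theorem pyBump_freqL_add (w : List Int) (v : Int) (h0 : 0 ≤ v) (h1 : v ≤ 200) :
    pyBump (freqL w) v 1 = freqL (w ++ [v]) := by
  apply pyBump_freqL_count w (w ++ [v]) v h0 h1 1
  intro x _ _
  by_cases h : x = v
  · subst h; simp [List.count_append]
  · simp [List.count_append, List.count_singleton', h, Ne.symm h]

theorem pyBump_freqL_sub (w : List Int) (v : Int) (h0 : 0 ≤ v) (h1 : v ≤ 200) :
    pyBump (freqL (v :: w)) v (-1) = freqL w := by
  apply pyBump_freqL_count (v :: w) w v h0 h1 (-1)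
  intro x _ _
  by_cases h : x = v <;> simp [List.count_cons, h] <;> omega

theorem freqL_nil : freqL [] = List.replicate 201 0 := by
  rw [List.eq_replicate_iff]
  refine ⟨by rw [freqL_length], ?_⟩
  intro b hb
  simp only [freqL, List.mem_map] at hb
  obtain ⟨x, -, hx⟩ := hb
  simp at hx
  omega

theorem foldl_bump_freqL (l w : List Int) (h : ∀ x ∈ l, 0 ≤ x ∧ x ≤ 200) :
    l.foldl (fun f i => pyBump f i 1) (freqL w) = freqL (w ++ l) := by
  induction l generalizing w with
  | nil => simp
  | cons x l ih =>
    have hx := h x (by simp)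
    simp only [List.foldl_cons, pyBump_freqL_add w x hx.1 hx.2]
    rw [ih (w ++ [x]) (fun y hy => h y (by simp [hy]))]
    simp

theorem getLimitLoop_ne (m1 m2 : Int) (f : List Int) (i c : Int) (m : List Int)
    (hm : m ≠ []) (h2 : m2 ≤ c + f.sum) (hf : f ≠ []) :
    getLimitLoop m1 m2 f i c m = m ++ [i + firstGE m2 f c] := by
  induction f generalizing i c m with
  | nil => exact absurd rfl hf
  | cons j rest ih =>
    simp only [getLimitLoop, firstGE]
    rw [if_neg (c := m = [] ∧ m1 ≤ c + j) (fun hc => hm hc.1)]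
    by_cases h : m2 ≤ c + j
    · simp [h]
    · have hrest : rest ≠ [] := by
        rintro rfl
        simp at h2
        omega
      have harith : i + (1 + firstGE m2 rest (c + j)) = (i + 1) + firstGE m2 rest (c + j) := by ring
      rw [if_neg h, if_neg h, harith, ih (i+1) (c+j) m hm (by simp at h2 ⊢; omega) hrest]

theorem getLimitLoop_nil (m1 m2 : Int) (f : List Int) (i c : Int)
    (h12 : m1 ≤ m2) (h2 : m2 ≤ c + f.sum) (hf : f ≠ []) :
    getLimitLoop m1 m2 f i c [] = [i + firstGE m1 f c, i + firstGE m2 f c] := by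
  induction f generalizing i c with
  | nil => exact absurd rfl hf
  | cons j rest ih =>
    simp only [getLimitLoop, firstGE]
    by_cases ha : m1 ≤ c + j
    · by_cases hb : m2 ≤ c + j
      · simp [ha, hb]
      · have hrest : rest ≠ [] := by
          rintro rfl
          simp at h2
          omega
        have hsum : m2 ≤ (c + j) + rest.sum := by simp at h2; omega
        simp only [ha, hb, if_true, if_false, if_neg hb, eq_self_iff_true, true_and, if_pos trivial]
        rw [getLimitLoop_ne m1 m2 rest (i+1) (c+j) ([] ++ [i]) (by simp) hsum hrest]
        simp
        omega
    · have hb : ¬ m2 ≤ c + j := by omega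
      have hrest : rest ≠ [] := by
        rintro rfl
        simp at h2
        omega
      have hsum : m2 ≤ (c + j) + rest.sum := by simp at h2; omega
      simp only [ha, hb, if_false, and_false, false_and]
      rw [ih (i+1) (c+j) hsum hrest]
      simp
      constructor <;> omega

theorem firstGE_eq (k : Int) (f : List Int) (c : Int) (t : Nat) (ht : t < f.length)
    (hhit : k ≤ c + (f.take (t + 1)).sum)
    (hbefore : ∀ u : Nat, u < t → c + (f.take (u + 1)).sum < k) :
    firstGE k f c = (t : Int) := by
  induction f generalizing c t with
  | nil => simp at ht
  | cons j rest ih =>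
    simp only [firstGE]
    by_cases h : k ≤ c + j
    · have ht0 : t = 0 := by
        by_contra hne
        have := hbefore 0 (by omega)
        simp at this
        omega
      simp [h, ht0]
    · have ht0 : t ≠ 0 := by
        rintro rfl
        simp at hhit
        omega
      obtain ⟨t', rfl⟩ : ∃ t', t = t' + 1 := ⟨t - 1, by omega⟩
      rw [if_neg h, ih (c + j) t' (by simpa using ht)
        (by simp only [List.take_succ_cons, List.sum_cons] at hhit; omega)
        (by
          intro u hu
          have := hbefore (u + 1) (by omega)
          simp only [List.take_succ_cons, List.sum_cons] at this
          omega)]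
      push_cast
      ring

theorem countP_lt_succ (w : List Int) (m : Nat) :
    w.countP (fun x => decide (x < ((m : Int) + 1))) =
      w.countP (fun x => decide (x < (m : Int))) + w.count (m : Int) := by
  induction w with
  | nil => simp
  | cons v w ih =>
    simp only [List.countP_cons, List.count_cons, ih]
    by_cases h1 : v < (m : Int) + 1 <;> by_cases h2 : v < (m : Int) <;>
      by_cases h3 : v = (m : Int) <;> simp [h1, h2, h3] <;> omega

theorem sum_range_count (w : List Int) (hw : ∀ x ∈ w, 0 ≤ x) (m : Nat) :
    (List.map (fun x : Nat => (w.count (x : Int) : Int)) (List.range m)).sum =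
      (w.countP (fun x => decide (x < (m : Int))) : Int) := by
  induction m with
  | zero =>
    simp only [List.range_zero, List.map_nil, List.sum_nil]
    rw [List.countP_eq_zero.2 (fun x hx => by have := hw x hx; simpa using by omega)]
    simp
  | succ m ih =>
    rw [List.range_succ, List.map_append, List.sum_append, ih]
    have := countP_lt_succ w m
    push_cast
    push_cast at this
    simp only [List.map_cons, List.map_nil, List.sum_cons, List.sum_nil, add_zero]
    omega

theorem take_freqL_sum (w : List Int) (hw : ∀ x ∈ w, 0 ≤ x) (m : Nat) (hm : m ≤ 201) :
    ((freqL w).take m).sum = (w.countP (fun x => decide (x < (m : Int))) : Int) := by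
  rw [freqL, ← List.map_take, List.take_range, min_eq_left hm, sum_range_count w hw m]

theorem freqL_sum (w : List Int) (hw : ∀ x ∈ w, 0 ≤ x ∧ x ≤ 200) :
    (freqL w).sum = (w.length : Int) := by
  have h1 : (freqL w).take 201 = freqL w := List.take_of_length_le (by rw [freqL_length])
  rw [← h1, take_freqL_sum w (fun x hx => (hw x hx).1) 201 le_rfl,
      List.countP_eq_length.2 (fun x hx => by have := hw x hx; simpa using by omega)]

theorem countP_take_drop (p : Int → Bool) (s : List Int) (k : Nat) :
    s.countP p = (s.take k).countP p + (s.drop k).countP p := by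
  conv_lhs => rw [← List.take_append_drop k s]
  rw [List.countP_append]

theorem rank_ge' (s w : List Int) (hperm : s.Perm w)
    (hmono : ∀ (p q : Nat) (hpq : p ≤ q) (hq : q < s.length), s[p]'(Nat.lt_of_le_of_lt hpq hq) ≤ s[q])
    (k : Nat) (hk1 : 1 ≤ k) (hk2 : k ≤ s.length) (hs : k - 1 < s.length) (a : Int)
    (ha : s[k - 1] = a) :
    (k : Int) ≤ (w.countP (fun x => decide (x ≤ a)) : Int) := by
  rw [← hperm.countP_eq, countP_take_drop (fun x => decide (x ≤ a)) s k]
  have htk : (s.take k).length = k := by rw [List.length_take]; omega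
  have hall : (s.take k).countP (fun x => decide (x ≤ a)) = k := by
    rw [List.countP_eq_length.2, htk]
    intro x hx
    rw [List.mem_iff_getElem] at hx
    obtain ⟨j, hj, rfl⟩ := hx
    rw [htk] at hj
    rw [List.getElem_take, ← ha]
    simpa using hmono j (k-1) (by omega) hs
  omega

theorem rank_lt' (s w : List Int) (hperm : s.Perm w)
    (hmono : ∀ (p q : Nat) (hpq : p ≤ q) (hq : q < s.length), s[p]'(Nat.lt_of_le_of_lt hpq hq) ≤ s[q])
    (k : Nat) (hk1 : 1 ≤ k) (hs : k - 1 < s.length) (a : Int)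
    (ha : s[k - 1] = a) (t : Int) (htlt : t < a) :
    (w.countP (fun x => decide (x ≤ t)) : Int) < (k : Int) := by
  rw [← hperm.countP_eq, countP_take_drop (fun x => decide (x ≤ t)) s (k-1)]
  have hdrop : (s.drop (k-1)).countP (fun x => decide (x ≤ t)) = 0 := by
    rw [List.countP_eq_zero]
    intro x hx
    rw [List.mem_iff_getElem] at hx
    obtain ⟨j, hj, rfl⟩ := hx
    rw [List.length_drop] at hj
    rw [List.getElem_drop]
    have h1 : s[k-1] ≤ s[k-1+j]'(by omega) := hmono (k-1) (k-1+j) (by omega) (by omega)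
    rw [ha] at h1
    simp
    omega
  have h1 : (s.take (k-1)).countP (fun x => decide (x ≤ t)) ≤ (s.take (k-1)).length :=
    List.countP_le_length
  have h2 : (s.take (k-1)).length ≤ k - 1 := by rw [List.length_take]; omega
  omega

theorem firstGE_freqL (w : List Int) (hw : ∀ x ∈ w, 0 ≤ x ∧ x ≤ 200) (k : Nat)
    (hk1 : 1 ≤ k) (hk2 : k ≤ w.length) :
    firstGE (k : Int) (freqL w) 0 =
      (PySem.List.sorted w (fun x => x) false)[k - 1]'(by
        rw [PySem.List.length_sorted]; omega) := by
  have hs : k - 1 < (PySem.List.sorted w (fun x => x) false).length := by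
    rw [PySem.List.length_sorted]; omega
  obtain ⟨a, ha⟩ : ∃ a, (PySem.List.sorted w (fun x => x) false)[k-1]'hs = a := ⟨_, rfl⟩
  rw [ha]
  have hmem : a ∈ w := by
    rw [← PySem.List.mem_sorted w (fun x => x) false]
    rw [← ha]
    exact List.getElem_mem hs
  have haw := hw a hmem
  have hperm : (PySem.List.sorted w (fun x => x) false).Perm w :=
    PySem.List.sorted_perm w (fun x => x) false
  have hmono := fun (p q : Nat) (hpq : p ≤ q) (hq : q < (PySem.List.sorted w (fun x => x) false).length) =>
    PySem.List.sorted_id_getElem_mono w hpq hq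
  have hge := rank_ge' _ w hperm hmono k hk1 (by rwa [PySem.List.length_sorted]) hs a ha
  have hlt := fun (t : Int) (htlt : t < a) => rank_lt' _ w hperm hmono k hk1 hs a ha t htlt
  rw [show a = ((a.toNat : Nat) : Int) by omega]
  apply firstGE_eq (k : Int) (freqL w) 0 a.toNat (by rw [freqL_length]; omega)
  · rw [zero_add, take_freqL_sum w (fun x hx => (hw x hx).1) (a.toNat + 1) (by omega)]
    have hc : w.countP (fun x => decide (x < ((a.toNat + 1 : Nat) : Int))) =
        w.countP (fun x => decide (x ≤ a)) := by
      apply List.countP_congr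
      intro x _
      simp
      try omega
    rw [hc]
    exact hge
  · intro u hu
    rw [zero_add, take_freqL_sum w (fun x hx => (hw x hx).1) (u + 1) (by omega)]
    have hc : w.countP (fun x => decide (x < ((u + 1 : Nat) : Int))) =
        w.countP (fun x => decide (x ≤ (u : Int))) := by
      apply List.countP_congr
      intro x _
      simp
      try omega
    rw [hc]
    exact hlt (u : Int) (by omega)

theorem getLimit_eq (w : List Int) (D : Nat) (hD : 1 ≤ D) (hlen : w.length = D)
    (hw : ∀ x ∈ w, 0 ≤ x ∧ x ≤ 200) :
    getLimit (freqL w) (D : Int) =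
      (if PySem.Int.mod (D : Int) 2 ≠ 0 then
        2 * PySem.List.pyGetD (PySem.List.sorted w (fun x => x) false) (PySem.Int.floordiv (D : Int) 2) 0
       else
        PySem.List.pyGetD (PySem.List.sorted w (fun x => x) false) (PySem.Int.floordiv (D : Int) 2 - 1) 0 +
        PySem.List.pyGetD (PySem.List.sorted w (fun x => x) false) (PySem.Int.floordiv (D : Int) 2) 0) := by
  have hm1 : PySem.Int.floordiv (D : Int) 2 = ((D / 2 : Nat) : Int) := by
    rw [PySem.Int.floordiv_eq_ediv_of_pos (by omega)]
    omega
  have hslen : (PySem.List.sorted w (fun x => x) false).length = D := by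
    rw [PySem.List.length_sorted, hlen]
  have hmod : PySem.Int.mod (D : Int) 2 = ((D % 2 : Nat) : Int) := by
    rw [PySem.Int.mod_eq_emod_of_pos (by omega)]
    omega
  have hne : freqL w ≠ [] := by
    intro h
    have := freqL_length w
    rw [h] at this
    simp at this
  have hloop : getLimitLoop (((D / 2 : Nat) : Int)) (((D / 2 : Nat) : Int) + 1) (freqL w) 0 0 [] =
      [0 + firstGE ((D / 2 : Nat) : Int) (freqL w) 0, 0 + firstGE (((D / 2 : Nat) : Int) + 1) (freqL w) 0] :=
    getLimitLoop_nil _ _ _ 0 0 (by omega)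
      (by rw [freqL_sum w hw, hlen]; push_cast; omega) hne
  have hk2 : ((((D / 2 + 1 : Nat)) : Int)) = ((D / 2 : Nat) : Int) + 1 := by push_cast; ring
  have hfge2 : firstGE (((D / 2 : Nat) : Int) + 1) (freqL w) 0 =
      (PySem.List.sorted w (fun x => x) false)[(D / 2 + 1) - 1]'(by omega) := by
    rw [← hk2]
    exact firstGE_freqL w hw (D / 2 + 1) (by omega) (by omega)
  simp only [getLimit, hm1, hmod]
  by_cases hodd : ((D % 2 : Nat) : Int) ≠ 0
  · rw [if_pos hodd, if_pos hodd, hloop]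
    rw [PySem.List.pyGetD_neg_one _ _ (by simp)]
    simp only [List.getLast, zero_add]
    rw [hfge2,
        PySem.List.pyGetD_eq_getElem _ _ (by omega) (by rw [hslen]; omega)]
    have : (((D / 2 : Nat) : Int)).toNat = D / 2 := by omega
    simp only [this, show D / 2 + 1 - 1 = D / 2 from by omega]
    ring
  · rw [if_neg hodd, if_neg hodd, hloop]
    have hD2 : 1 ≤ D / 2 := by omega
    have hfge1 : firstGE ((D / 2 : Nat) : Int) (freqL w) 0 =
        (PySem.List.sorted w (fun x => x) false)[(D / 2) - 1]'(by omega) :=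
      firstGE_freqL w hw (D / 2) (by omega) (by omega)
    rw [PySem.List.pyGetD_eq_getElem _ _ (by omega) (by rw [hslen]; omega),
        PySem.List.pyGetD_eq_getElem _ _ (by omega) (by rw [hslen]; omega)]
    simp only [List.sum_cons, List.sum_nil, add_zero, zero_add]
    rw [hfge1, hfge2]
    have e1 : (((D / 2 : Nat) : Int) - 1).toNat = D / 2 - 1 := by omega
    have e2 : (((D / 2 : Nat) : Int)).toNat = D / 2 := by omega
    simp only [e1, e2, show D / 2 + 1 - 1 = D / 2 from by omega]

theorem main_loop (e : List Int) (D : Nat) (hD : 1 ≤ D) (hw : ∀ x ∈ e, 0 ≤ x ∧ x ≤ 200) :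
    ∀ (q j : Nat), e.length = D + j + q → ∀ count : Int,
    ((PySem.List.enumerate (List.drop (D + j) e) (j : Int)).foldl (stepA e (D : Int))
        (freqL ((List.drop j e).take D), count)).2
      = (PySem.List.pyRange ((D : Int) + (j : Int)) e.length 1).foldl (stepB e (D : Int)) count := by
  intro q
  induction q with
  | zero =>
    intro j hq count
    rw [show List.drop (D + j) e = ([] : List Int) from List.drop_eq_nil_of_le (by omega),
        PySem.List.enumerate_nil, List.foldl_nil,
        PySem.List.pyRange_one_eq_nil (by push_cast; omega), List.foldl_nil]
  | succ q ih =>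
    intro j hq count
    have hjlen : j < e.length := by omega
    have hDjlen : D + j < e.length := by omega
    have hwinlen : ((List.drop j e).take D).length = D := by
      rw [List.length_take, List.length_drop]
      omega
    have hwbound : ∀ x ∈ (List.drop j e).take D, 0 ≤ x ∧ x ≤ 200 := fun x hx =>
      hw x (List.mem_of_mem_drop (List.mem_of_mem_take hx))
    have hdropcons : List.drop (D + j) e = e[D + j] :: List.drop (D + j + 1) e :=
      List.drop_eq_getElem_cons hDjlen
    rw [hdropcons, PySem.List.enumerate_cons, List.foldl_cons,
        PySem.List.pyRange_one_cons (by push_cast; omega), List.foldl_cons]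
    -- identify B's window slice with A's window
    have hslice : PySem.List.slice e (some ((D : Int) + (j : Int) - (D : Int))) (some ((D : Int) + (j : Int))) =
        (List.drop j e).take D := by
      rw [show (D : Int) + (j : Int) - (D : Int) = ((j : Nat) : Int) by push_cast; ring,
          show (D : Int) + (j : Int) = (((D + j : Nat)) : Int) by push_cast; ring,
          PySem.List.slice_natCast]
      congr 1
      omega
    -- both indexings of e
    have hget_j : PySem.List.pyGetD e ((j : Nat) : Int) 0 = e[j] := by
      rw [PySem.List.pyGetD_eq_getElem _ _ (by omega) (by push_cast; omega)]
      simp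
    have hget_Dj : PySem.List.pyGetD e ((D : Int) + (j : Int)) 0 = e[D + j] := by
      rw [PySem.List.pyGetD_eq_getElem _ _ (by omega) (by push_cast; omega)]
      simp only [show ((D : Int) + (j : Int)).toNat = D + j from by omega]
    -- A's limit is B's threshold
    have hlimit := getLimit_eq ((List.drop j e).take D) D hD hwinlen hwbound
    -- the two window multiset updates
    have hwin_snoc : (List.drop j e).take D ++ [e[D + j]] = e[j] :: (List.drop (j + 1) e).take D := by
      have hgd : (List.drop j e)[D]'(by rw [List.length_drop]; omega) = e[D + j] := by
        rw [List.getElem_drop]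
        congr 1
        omega
      rw [← hgd, ← List.take_succ_eq_append_getElem (by rw [List.length_drop]; omega),
          List.drop_eq_getElem_cons hjlen, List.take_succ_cons]
    have hbump : pyBump (pyBump (freqL ((List.drop j e).take D)) e[D + j] 1) e[j] (-1) =
        freqL ((List.drop (j + 1) e).take D) := by
      rw [pyBump_freqL_add _ _ (hw _ (List.getElem_mem hDjlen)).1 (hw _ (List.getElem_mem hDjlen)).2,
          hwin_snoc,
          pyBump_freqL_sub _ _ (hw _ (List.getElem_mem hjlen)).1 (hw _ (List.getElem_mem hjlen)).2]
    simp only [stepA, stepB, hslice, hget_j, hget_Dj, hlimit, hbump]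
    have harr1 : (j : Int) + 1 = ((j + 1 : Nat) : Int) := by push_cast; ring
    have harr2 : (D : Int) + (j : Int) + 1 = (D : Int) + ((j + 1 : Nat) : Int) := by push_cast; ring
    have harr3 : D + j + 1 = D + (j + 1) := by omega
    rw [harr1, harr2, harr3, ih (j + 1) (by omega) _]

-- ===== VERDICT (by name: the statement is the Claim_ definition above) =====
theorem activityNotifications2_spec : Claim_equal_activityNotifications2 := by
  intro e n d hdom hpre
  obtain ⟨hd1, -, hw'⟩ := hpre
  unfold Spec_activityNotifications2
  rw [portA_eq e n d, portB_eq e n d]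
  obtain ⟨D, rfl⟩ : ∃ D : Nat, d = (D : Int) := ⟨d.toNat, by omega⟩
  have hD : 1 ≤ D := by omega
  rw [PySem.List.slice_to e (by omega), PySem.List.slice_from e (by omega)]
  simp only [Int.toNat_natCast]
  by_cases hlen : D ≤ e.length
  · have hw : ∀ x ∈ e, 0 ≤ x ∧ x ≤ 200 := hw' (by push_cast; omega)
    rw [← freqL_nil, foldl_bump_freqL (e.take D) [] (fun x hx => hw x (List.mem_of_mem_take hx)),
        List.nil_append]
    have h := main_loop e D hD hw (e.length - D) 0 (by omega) 0
    simp only [List.drop_zero, Nat.cast_zero, add_zero] at h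
    exact h
  · rw [show List.drop D e = ([] : List Int) from List.drop_eq_nil_of_le (by omega),
        PySem.List.enumerate_nil, List.foldl_nil,
        PySem.List.pyRange_one_eq_nil (by omega), List.foldl_nil]
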